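-- pv_equiv track=rewrite | github.com/nicolajack/BUCS111 | ps4/ps4pr3.py | double_rec
-- ===== SOURCE A (Python) =====
-- def double_rec(binvals):
--     """takes a list binvals of 0 or more strings – each of which represents a binary number – and that uses recursion to compute and return a new list in which all of the binary numbers have been doubled"""
--     if binvals == '':
--         return []
--     elif binvals == []:
--         return []
--     else:
--         rest_double = double_rec(binvals[1:])
--         return [(binvals[0]) + '0'] + rest_double
-- ===== SOURCE B (Python) =====
-- def double_rec(binvals):
--     """takes a list binvals of 0 or more strings – each of which represents a binary number – and that uses recursion to compute and return a new list in which all of the binary numbers have been doubled"""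
--     result = []
--     for x in binvals:
--         result.append(x + '0')
--     return result
-- ===== Notes on version B (the rewrite author's own statement) =====
-- stated objective: faster
-- what changed: Replaces recursion with repeated list concatenation ([h+'0'] + rest, quadratic) by a single iterative loop appending to an accumulator list.
import Mathlib
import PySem

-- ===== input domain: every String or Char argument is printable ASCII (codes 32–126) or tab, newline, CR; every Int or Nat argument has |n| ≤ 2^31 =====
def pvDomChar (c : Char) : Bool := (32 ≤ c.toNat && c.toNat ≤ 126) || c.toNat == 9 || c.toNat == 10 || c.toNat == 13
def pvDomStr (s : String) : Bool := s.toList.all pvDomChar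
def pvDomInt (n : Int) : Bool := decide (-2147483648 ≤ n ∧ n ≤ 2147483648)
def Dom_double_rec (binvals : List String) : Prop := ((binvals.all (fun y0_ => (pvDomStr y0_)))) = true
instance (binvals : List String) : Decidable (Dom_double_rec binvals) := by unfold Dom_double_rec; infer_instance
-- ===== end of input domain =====

-- B replaces A's recursion (with quadratic list concatenation) by one iterative accumulator loop.


-- ===== PORT A =====
-- A's 'binvals == ""' branch can never be true for a list argument, so it is folded into the [] case.
def double_rec (binvals : List String) : List String :=
  match binvals with
  | [] => []
  | h :: t => (h ++ "0") :: double_rec t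

-- ===== PORT B =====
-- iterative loop: result = []; for x in binvals: result.append(x + '0')
def double_rec_alt (binvals : List String) : List String :=
  binvals.foldl (fun result x => result ++ [x ++ "0"]) []

-- ===== PRECONDITION & SPEC =====
def Spec_double_rec (binvals : List String) (out : List String) : Prop := out = double_rec_alt binvals
instance (binvals : List String) (out : List String) : Decidable (Spec_double_rec binvals out) := by unfold Spec_double_rec; infer_instance

-- ===== CLAIM (what is proved, stated in full; the proofs are below) =====
def Claim_equal_double_rec : Prop := ∀ (binvals : List String), Dom_double_rec binvals → Spec_double_rec binvals (double_rec binvals)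

-- ===== LEMMAS AND PROOFS =====
theorem double_rec_alt_acc (l : List String) (acc : List String) :
    l.foldl (fun result x => result ++ [x ++ "0"]) acc = acc ++ double_rec l := by
  induction l generalizing acc with
  | nil => simp [double_rec]
  | cons h t ih => simp [List.foldl, double_rec, ih]

-- ===== VERDICT (by name: the statement is the Claim_ definition above) =====
theorem double_rec_spec : Claim_equal_double_rec := by
  intro binvals _
  unfold Spec_double_rec double_rec_alt
  rw [double_rec_alt_acc]
  simp
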